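-- pv_equiv track=rewrite | github.com/nownabe/competitive_programming | AtCoder/arc006c_Tsumikasane.py | search
-- ===== SOURCE A (Python) =====
-- def search(weights):
--     patterns = []
--
--     for w in weights:
--         if len(patterns) == 0:
--             patterns.append([w])
--         else:
--             patterns.append(patterns[-1][:] + [w])
--
--         for piles in patterns[:-1]:
--             candidates = [pile for pile in piles if pile >= w]
--             if len(candidates) > 0:
--                 piles[piles.index(min(candidates))] = w
--             else:
--                 piles.append(w)
--
--     return min([len(piles) for piles in patterns])
-- ===== SOURCE B (Python) =====
-- def search(weights):
--     # Patience sorting: keep the (strictly increasing) list of pile tops;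
--     # for each weight, binary-search the leftmost top >= w and replace it
--     # (or start a new pile).  The number of piles is the answer.
--     tops = []
--     for w in weights:
--         lo, hi = 0, len(tops)
--         while lo < hi:
--             mid = (lo + hi) // 2
--             if tops[mid] < w:
--                 lo = mid + 1
--             else:
--                 hi = mid
--         if lo < len(tops):
--             tops[lo] = w
--         else:
--             tops.append(w)
--     return len(tops)
-- ===== Notes on version B (the rewrite author's own statement) =====
-- stated objective: faster
-- what changed: A simulates a fresh greedy pile-stacking run restarted at every index (a quadratic number of piles lists, each rescanned linearly) and takes the minimum; B keeps a single strictly increasing list of pile tops (patience sorting) and places each weight by binary search, returning its length.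
import Mathlib
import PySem

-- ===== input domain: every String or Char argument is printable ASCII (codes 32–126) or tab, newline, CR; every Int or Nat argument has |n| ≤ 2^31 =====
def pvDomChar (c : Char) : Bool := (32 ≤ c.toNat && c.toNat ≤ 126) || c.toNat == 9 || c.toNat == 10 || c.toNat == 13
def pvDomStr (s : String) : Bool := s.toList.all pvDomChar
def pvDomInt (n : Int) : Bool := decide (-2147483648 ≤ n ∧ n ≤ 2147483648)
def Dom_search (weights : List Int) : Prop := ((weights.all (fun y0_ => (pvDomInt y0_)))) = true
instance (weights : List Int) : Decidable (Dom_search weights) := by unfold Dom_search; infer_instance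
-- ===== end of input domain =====

-- B replaces A's restarted greedy pile simulations (O(n^3)) by a single patience-sorting
-- pass with binary search (O(n log n)); equal return values proved on nonempty inputs.

-- ===== PORT A =====
-- inner loop body: given w, update one `piles` list exactly as A's for-body does
def pvUpdA (w : Int) (piles : List Int) : List Int :=
  let candidates := piles.filter (fun pile => decide (w ≤ pile))
  if 0 < candidates.length then
    match PySem.List.min? candidates (fun x => x) with
    | some m =>
      match PySem.List.index? piles m with
      | some i => piles.set i w
      | none => piles          -- unreachable: m ∈ piles
    | none => piles            -- unreachable: candidates ≠ []
  else
    piles ++ [w]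

-- one iteration of A's outer `for w in weights` loop over the whole `patterns` state
def pvStepA (patterns : List (List Int)) (w : Int) : List (List Int) :=
  let ps := if patterns.length = 0 then [[w]]
            else patterns ++ [patterns.getLastD [] ++ [w]]   -- patterns[-1][:] + [w]
  ps.dropLast.map (pvUpdA w) ++ [ps.getLastD []]             -- for piles in patterns[:-1]

def search (weights : List Int) : Int :=
  let patterns := weights.foldl pvStepA []
  match PySem.List.min? (patterns.map (fun piles => (piles.length : Int))) (fun x => x) with
  | some m => m
  | none => 0                  -- unreachable under Pre_: min([]) raises ValueError

-- ===== PORT B =====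
-- hand-written binary search of Source B: leftmost index in [lo, hi) with tops[idx] >= w
def pvBisect (tops : List Int) (w : Int) (lo hi : Nat) : Nat :=
  if _h : lo < hi then
    let mid := (lo + hi) / 2
    if tops.getD mid 0 < w then pvBisect tops w (mid + 1) hi
    else pvBisect tops w lo mid
  else lo
termination_by hi - lo
decreasing_by all_goals omega

def pvStepB (tops : List Int) (w : Int) : List Int :=
  let lo := pvBisect tops w 0 tops.length
  if lo < tops.length then tops.set lo w else tops ++ [w]

def search_alt (weights : List Int) : Int :=
  ((weights.foldl pvStepB []).length : Int)

-- ===== PRECONDITION & SPEC =====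
-- Pre_ excludes only the empty list, on which A raises ValueError (min of an empty list).
def Pre_search (weights : List Int) : Prop := weights ≠ []
instance (weights : List Int) : Decidable (Pre_search weights) := by unfold Pre_search; infer_instance
def pvWitness_search : List Int := ([2, 1, 3] : List Int)

def Spec_search (weights : List Int) (out : Int) : Prop := out = search_alt weights
instance (weights : List Int) (out : Int) : Decidable (Spec_search weights out) := by unfold Spec_search; infer_instance

-- ===== CLAIM (what is proved, stated in full; the proofs are below) =====
def Claim_equal_search : Prop := ∀ (weights : List Int), Dom_search weights → Pre_search weights → Spec_search weights (search weights)

-- ===== LEMMAS AND PROOFS =====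

theorem set_multiset (l : List Int) (m w : Int) (i : Nat)
    (h : PySem.List.index? l m = some i) :
    (↑(l.set i w) : Multiset Int) = (↑l : Multiset Int).erase m + {w} := by
  obtain ⟨pre, suf, rfl, rfl, hnot⟩ := (PySem.List.index?_eq_some_iff _ _ _).1 h
  rw [List.set_append_right _ _ (le_refl _)]
  simp only [Nat.sub_self, List.set_cons_zero]
  simp [← Multiset.coe_singleton]
  rw [List.erase_append_right _ hnot, List.erase_cons_head]
  exact (List.Perm.append_left pre (List.perm_append_singleton w suf).symm).trans (List.append_assoc _ _ _ ▸ List.Perm.rfl)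

theorem pvUpdA_multiset (w : Int) (l : List Int) :
    (↑(pvUpdA w l) : Multiset Int) =
      match PySem.List.min? (l.filter (fun x => decide (w ≤ x))) (fun x => x) with
      | some m => (↑l : Multiset Int).erase m + {w}
      | none => (↑l : Multiset Int) + {w} := by
  unfold pvUpdA
  cases hm : PySem.List.min? (l.filter (fun x => decide (w ≤ x))) (fun x => x) with
  | none =>
    have : l.filter (fun x => decide (w ≤ x)) = [] := (PySem.List.min?_eq_none_iff _ _).1 hm
    simp [this, ← Multiset.coe_singleton, ← Multiset.coe_add]
  | some m =>
    have hmem : m ∈ l.filter (fun x => decide (w ≤ x)) := PySem.List.min?_mem hm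
    have hlen : 0 < (l.filter (fun x => decide (w ≤ x))).length :=
      List.length_pos_of_mem hmem
    have hml : m ∈ l := (List.mem_filter.1 hmem).1
    obtain ⟨i, hi⟩ := (PySem.List.index?_isSome_iff l m).2 hml |> Option.isSome_iff_exists.1
    simp only [hlen, if_pos, hm, hi]
    exact set_multiset l m w i hi

theorem pvUpdA_cons_le (w x : Int) (l : List Int) :
    (↑(pvUpdA w l) : Multiset Int) ≤ (↑(pvUpdA w (x :: l)) : Multiset Int) := by
  rw [pvUpdA_multiset, pvUpdA_multiset]
  by_cases hx : w ≤ x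
  · have hfil : (x :: l).filter (fun y => decide (w ≤ y)) =
        x :: l.filter (fun y => decide (w ≤ y)) := by simp [hx]
    rw [hfil]
    cases hF : PySem.List.min? (l.filter (fun y => decide (w ≤ y))) (fun y => y) with
    | none =>
      have hFe : l.filter (fun y => decide (w ≤ y)) = [] :=
        (PySem.List.min?_eq_none_iff _ _).1 hF
      rw [hFe]
      cases hm' : PySem.List.min? [x] (fun y => y) with
      | none => exact absurd ((PySem.List.min?_eq_none_iff _ _).1 hm') (by simp)
      | some m' =>
        have hmx : m' = x := by
          have := PySem.List.min?_mem hm'; simpa using this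
        subst hmx
        show (↑l : Multiset Int) + {w} ≤ (↑(m' :: l) : Multiset Int).erase m' + {w}
        simp [← Multiset.cons_coe, Multiset.erase_cons_head]
    | some mF =>
      have hmFmem : mF ∈ l.filter (fun y => decide (w ≤ y)) := PySem.List.min?_mem hF
      cases hm' : PySem.List.min? (x :: l.filter (fun y => decide (w ≤ y))) (fun y => y) with
      | none => exact absurd ((PySem.List.min?_eq_none_iff _ _).1 hm') (by simp)
      | some m' =>
        have hm'mem : m' ∈ x :: l.filter (fun y => decide (w ≤ y)) := PySem.List.min?_mem hm'
        show (↑l : Multiset Int).erase mF + {w} ≤ (↑(x :: l) : Multiset Int).erase m' + {w}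
        by_cases hmx : m' = x
        · subst hmx
          calc ((↑l : Multiset Int).erase mF + {w})
              ≤ (↑l : Multiset Int) + {w} := by gcongr; exact Multiset.erase_le _ _
            _ = (↑(m' :: l) : Multiset Int).erase m' + {w} := by
                simp [← Multiset.cons_coe, Multiset.erase_cons_head]
        · have hm'F : m' ∈ l.filter (fun y => decide (w ≤ y)) := by
            rcases List.mem_cons.1 hm'mem with h | h
            · exact absurd h hmx
            · exact h
          have h1 : m' ≤ mF := PySem.List.min?_isMin hm' mF (List.mem_cons_of_mem _ hmFmem)
          have h2 : mF ≤ m' := PySem.List.min?_isMin hF m' hm'F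
          have heq : m' = mF := le_antisymm h1 h2
          subst heq
          rw [← Multiset.cons_coe, Multiset.erase_cons_tail _ (fun hc => hmx hc.symm)]
          gcongr
          exact Multiset.le_cons_self _ _
  · have hfil : (x :: l).filter (fun y => decide (w ≤ y)) =
        l.filter (fun y => decide (w ≤ y)) := by simp [hx]
    rw [hfil]
    cases hF : PySem.List.min? (l.filter (fun y => decide (w ≤ y))) (fun y => y) with
    | none =>
      show (↑l : Multiset Int) + {w} ≤ (↑(x :: l) : Multiset Int) + {w}
      rw [← Multiset.cons_coe]
      gcongr
      exact Multiset.le_cons_self _ _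
    | some mF =>
      have hmF : w ≤ mF := by
        have := List.mem_filter.1 (PySem.List.min?_mem hF); simpa using this.2
      show (↑l : Multiset Int).erase mF + {w} ≤ (↑(x :: l) : Multiset Int).erase mF + {w}
      rw [← Multiset.cons_coe, Multiset.erase_cons_tail _ (by intro hc; exact hx (by omega))]
      gcongr
      exact Multiset.le_cons_self _ _

theorem min?_value_congr (a b : List Int) (h : a.Perm b) :
    PySem.List.min? a (fun y => y) = PySem.List.min? b (fun y => y) := by
  cases ha : PySem.List.min? a (fun y => y) with
  | none =>
    have ha' : a = [] := (PySem.List.min?_eq_none_iff _ _).1 ha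
    subst ha'
    have hb' : b = [] := List.nil_perm.1 h
    subst hb'
    rfl
  | some ma =>
    cases hb : PySem.List.min? b (fun y => y) with
    | none =>
      have hb' : b = [] := (PySem.List.min?_eq_none_iff _ _).1 hb
      subst hb'
      have ha' : a = [] := List.perm_nil.1 h
      subst ha'
      simpa [PySem.List.min?] using ha
    | some mb =>
      have h1 : ma ≤ mb := PySem.List.min?_isMin ha mb (h.mem_iff.2 (PySem.List.min?_mem hb))
      have h2 : mb ≤ ma := PySem.List.min?_isMin hb ma (h.mem_iff.1 (PySem.List.min?_mem ha))
      exact congrArg some (le_antisymm h1 h2)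

theorem pvUpdA_multiset_congr (w : Int) (a b : List Int) (h : (↑a : Multiset Int) = ↑b) :
    (↑(pvUpdA w a) : Multiset Int) = ↑(pvUpdA w b) := by
  have hp : a.Perm b := Multiset.coe_eq_coe.1 h
  rw [pvUpdA_multiset, pvUpdA_multiset,
      min?_value_congr _ _ (hp.filter (fun y => decide (w ≤ y)))]
  cases PySem.List.min? (b.filter (fun y => decide (w ≤ y))) (fun y => y) with
  | none => rw [h]
  | some m => rw [h]

theorem pvUpdA_mono_aux (w : Int) (c : List Int) :
    ∀ a b : List Int, (↑b : Multiset Int) = ↑a + ↑c →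
      (↑(pvUpdA w a) : Multiset Int) ≤ ↑(pvUpdA w b) := by
  induction c with
  | nil => exact fun a b h => le_of_eq (pvUpdA_multiset_congr w a b (by simpa using h.symm))
  | cons y c ih =>
    intro a b h
    refine le_trans (pvUpdA_cons_le w y a) (ih (y :: a) b ?_)
    rw [h]
    simp [← Multiset.cons_coe, Multiset.cons_add, Multiset.add_cons]

theorem pvUpdA_mono (w : Int) (a b : List Int) (h : (↑a : Multiset Int) ≤ ↑b) :
    (↑(pvUpdA w a) : Multiset Int) ≤ ↑(pvUpdA w b) := by
  obtain ⟨d, hd⟩ := Multiset.le_iff_exists_add.1 h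
  exact pvUpdA_mono_aux w d.toList a b (by rw [Multiset.coe_toList]; exact hd)

theorem pvUpdA_le_add (w : Int) (l : List Int) :
    (↑(pvUpdA w l) : Multiset Int) ≤ ↑l + {w} := by
  rw [pvUpdA_multiset]
  cases PySem.List.min? (l.filter (fun y => decide (w ≤ y))) (fun y => y) with
  | none => exact le_refl _
  | some m =>
    show (↑l : Multiset Int).erase m + {w} ≤ ↑l + {w}
    gcongr
    exact Multiset.erase_le _ _

theorem pv_i0_le (l : List Int) (w : Int) :
    (l.takeWhile (fun x => decide (x < w))).length ≤ l.length :=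
  (List.takeWhile_prefix _).length_le

theorem pv_lt_of_lt_i0 (l : List Int) (w : Int) (j : Nat)
    (hj : j < (l.takeWhile (fun x => decide (x < w))).length) (hjl : j < l.length) :
    l[j] < w := by
  have h1 := (List.takeWhile_prefix (l := l) (fun x => decide (x < w))).getElem hj
  have h2 := List.mem_takeWhile_imp (List.getElem_mem hj)
  rw [h1] at h2
  simpa using h2

theorem pv_le_of_i0_le (l : List Int) (w : Int) (hs : List.Pairwise (· < ·) l) (j : Nat)
    (hj : (l.takeWhile (fun x => decide (x < w))).length ≤ j) (hjl : j < l.length) :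
    w ≤ l[j] := by
  have hi0l : (l.takeWhile (fun x => decide (x < w))).length < l.length := lt_of_le_of_lt hj hjl
  have hsplit := List.takeWhile_append_dropWhile (p := fun x => decide (x < w)) (l := l)
  have hdne : l.dropWhile (fun x => decide (x < w)) ≠ [] := by
    intro hc
    rw [hc, List.append_nil] at hsplit
    rw [hsplit] at hi0l
    omega
  -- w ≤ head of the dropWhile part = l[i0]
  have hhead : (l.dropWhile (fun x => decide (x < w))).head hdne = l[(l.takeWhile (fun x => decide (x < w))).length]'hi0l := by
    rw [List.getElem_of_eq hsplit.symm hi0l, List.getElem_append_right (le_refl _)]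
    simp [List.head_eq_getElem]
  have hnot := List.head_dropWhile_not (fun x => decide (x < w)) hdne
  rw [hhead] at hnot
  have hwle : w ≤ l[(l.takeWhile (fun x => decide (x < w))).length]'hi0l := by simpa using hnot
  rcases Nat.eq_or_lt_of_le hj with heq | hlt
  · simp_rw [← heq] at hwle ⊢
    exact hwle
  · exact le_of_lt (lt_of_le_of_lt hwle
      (List.pairwise_iff_getElem.1 hs _ _ hi0l hjl hlt))

theorem pvBisect_eq (l : List Int) (w : Int) (hs : List.Pairwise (· < ·) l) :
    ∀ (n lo hi : Nat), hi - lo = n →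
      lo ≤ (l.takeWhile (fun x => decide (x < w))).length →
      (l.takeWhile (fun x => decide (x < w))).length ≤ hi → hi ≤ l.length →
      pvBisect l w lo hi = (l.takeWhile (fun x => decide (x < w))).length := by
  intro n
  induction n using Nat.strong_induction_on with
  | _ n ih =>
    intro lo hi hn h1 h2 h3
    rw [pvBisect]
    by_cases hlh : lo < hi
    · simp only [hlh, dif_pos]
      have hmid1 : lo ≤ (lo + hi) / 2 := by omega
      have hmid2 : (lo + hi) / 2 < hi := by omega
      have hmidl : (lo + hi) / 2 < l.length := lt_of_lt_of_le hmid2 h3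
      rw [List.getD_eq_getElem _ _ hmidl]
      by_cases hcmp : l[(lo + hi) / 2] < w
      · simp only [hcmp, if_pos]
        have hlt : (lo + hi) / 2 < (l.takeWhile (fun x => decide (x < w))).length := by
          by_contra hc
          exact absurd hcmp (not_lt.2 (pv_le_of_i0_le l w hs _ (not_lt.1 hc) hmidl))
        exact ih (hi - ((lo + hi) / 2 + 1)) (by omega) _ _ rfl (by omega) h2 h3
      · simp only [hcmp, if_neg]
        have hge : (l.takeWhile (fun x => decide (x < w))).length ≤ (lo + hi) / 2 := by
          by_contra hc
          exact hcmp (pv_lt_of_lt_i0 l w _ (not_le.1 hc) hmidl)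
        exact ih ((lo + hi) / 2 - lo) (by omega) _ _ rfl h1 hge (by omega)
    · rw [dif_neg hlh]
      omega

theorem pvStepB_eq (l : List Int) (w : Int) (hs : List.Pairwise (· < ·) l) :
    pvStepB l w =
      if h : (l.takeWhile (fun x => decide (x < w))).length < l.length
      then l.set (l.takeWhile (fun x => decide (x < w))).length w
      else l ++ [w] := by
  unfold pvStepB
  rw [pvBisect_eq l w hs (l.length - 0) 0 l.length rfl (Nat.zero_le _) (pv_i0_le l w) (le_refl _)]
  split_ifs with h
  · simp [h]
  · simp [h]

theorem pv_filter_eq_dropWhile (l : List Int) (w : Int) (hs : List.Pairwise (· < ·) l) :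
    l.filter (fun x => decide (w ≤ x)) = l.dropWhile (fun x => decide (x < w)) := by
  induction l with
  | nil => rfl
  | cons x xs ih =>
    rcases List.pairwise_cons.1 hs with ⟨hall, hxs⟩
    by_cases hx : x < w
    · simp only [List.filter_cons, List.dropWhile_cons]
      simp only [show decide (w ≤ x) = false by simp; omega, show decide (x < w) = true by simp [hx]]
      simpa using ih hxs
    · simp only [List.filter_cons, List.dropWhile_cons]
      simp only [show decide (w ≤ x) = true by simp; omega, show decide (x < w) = false by simp; omega]
      simp only [if_true, if_false, cond_true, cond_false]
      congr 1
      exact List.filter_eq_self.2 (fun y hy => by simp; have := hall y hy; omega)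

theorem pvUpdA_sorted (w : Int) (l : List Int) (hs : List.Pairwise (· < ·) l) :
    pvUpdA w l = pvStepB l w := by
  rw [pvStepB_eq l w hs]
  unfold pvUpdA
  rw [pv_filter_eq_dropWhile l w hs]
  have hsplit := List.takeWhile_append_dropWhile (p := fun x => decide (x < w)) (l := l)
  set i0 := (l.takeWhile (fun x => decide (x < w))).length with hi0
  by_cases hlen : i0 < l.length
  · -- dropWhile nonempty
    have hdne : l.dropWhile (fun x => decide (x < w)) ≠ [] := by
      intro hc
      rw [hc, List.append_nil] at hsplit
      have : i0 = l.length := by rw [hi0, hsplit]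
      omega
    have hpos : 0 < (l.dropWhile (fun x => decide (x < w))).length := List.length_pos_iff.2 hdne
    simp only [hpos, if_pos, dif_pos hlen]
    -- min? of the (sorted) dropWhile part is its head, which is l[i0]
    have hds : List.Pairwise (· < ·) (l.dropWhile (fun x => decide (x < w))) :=
      List.Pairwise.sublist (List.dropWhile_sublist _) hs
    have hhead : (l.dropWhile (fun x => decide (x < w))).head hdne = l[i0]'hlen := by
      rw [List.getElem_of_eq hsplit.symm hlen, List.getElem_append_right (le_refl _)]
      simp [List.head_eq_getElem]
    cases hm : PySem.List.min? (l.dropWhile (fun x => decide (x < w))) (fun y => y) with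
    | none => exact absurd ((PySem.List.min?_eq_none_iff _ _).1 hm) hdne
    | some m =>
      have hmm : m ∈ l.dropWhile (fun x => decide (x < w)) := PySem.List.min?_mem hm
      have hml : m ≤ (l.dropWhile (fun x => decide (x < w))).head hdne :=
        PySem.List.min?_isMin hm _ (List.head_mem hdne)
      have hlm : (l.dropWhile (fun x => decide (x < w))).head hdne ≤ m := by
        obtain ⟨h', t', ht⟩ := List.exists_cons_of_ne_nil hdne
        rcases List.mem_cons.1 (ht ▸ hmm) with rfl | hmt
        · simp [ht]
        · simp only [ht, List.head_cons]
          exact le_of_lt ((List.pairwise_cons.1 (ht ▸ hds)).1 m hmt)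
      have hmeq : m = l[i0]'hlen := by rw [← hhead]; exact le_antisymm hml hlm
      subst hmeq
      -- index? l l[i0] = some i0
      have hidx : PySem.List.index? l (l[i0]'hlen) = some i0 := by
        apply (PySem.List.index?_eq_some_iff _ _ _).2
        refine ⟨l.take i0, l.drop (i0 + 1), ?_, by simp; omega, ?_⟩
        · have hdr : l.drop i0 = l[i0]'hlen :: l.drop (i0 + 1) :=
            (List.getElem_cons_drop hlen).symm
          conv_lhs => rw [← List.take_append_drop i0 l, hdr]
        · intro hc
          obtain ⟨j, hj, hjv⟩ := List.mem_iff_getElem.1 hc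
          have hjlen : j < i0 := by simp at hj; omega
          have := pv_lt_of_lt_i0 l w j (hi0 ▸ hjlen) (by omega)
          rw [List.getElem_take] at hjv
          have hwle := pv_le_of_i0_le l w hs i0 (le_refl _) hlen
          omega
      simp only [hidx]
  · have hde : l.dropWhile (fun x => decide (x < w)) = [] := by
      have h1 : i0 ≤ l.length := pv_i0_le l w
      have : i0 = l.length := by omega
      have hlenlen := congrArg List.length hsplit
      simp only [List.length_append] at hlenlen
      rw [← List.length_eq_zero_iff]
      omega
    simp [hde, dif_neg hlen]

theorem pvStepB_sorted (w : Int) (l : List Int) (hs : List.Pairwise (· < ·) l) :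
    List.Pairwise (· < ·) (pvStepB l w) := by
  rw [pvStepB_eq l w hs]
  set i0 := (l.takeWhile (fun x => decide (x < w))).length with hi0
  split_ifs with h
  · apply List.pairwise_iff_getElem.2
    intro i j hi hj hij
    simp only [List.length_set] at hi hj
    rw [List.getElem_set, List.getElem_set]
    have hsij := List.pairwise_iff_getElem.1 hs
    split_ifs with h1 h2 h3
    · omega
    · -- l[j] with i0 = i < j : w ≤ l[i0] < l[j] hence w < l[j]? need w < l[j]: l[i0] ≥ w and l[i0] < l[j]
      subst h1
      exact lt_of_le_of_lt (pv_le_of_i0_le l w hs i0 (le_refl _) hi) (hsij _ _ hi hj hij)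
    · -- i < j = i0 : l[i] < w since i < i0
      subst h3
      exact pv_lt_of_lt_i0 l w i hij hi
    · exact hsij _ _ hi hj hij
  · apply List.pairwise_append.2
    refine ⟨hs, List.pairwise_singleton _ _, ?_⟩
    intro y hy w2 hw2
    simp only [List.mem_singleton] at hw2
    rw [hw2]
    obtain ⟨j, hj, rfl⟩ := List.mem_iff_getElem.1 hy
    exact pv_lt_of_lt_i0 l w j (by omega) hj

theorem pvStepA_eq (P : List (List Int)) (hP : P ≠ []) (w : Int) :
    pvStepA P w = P.map (pvUpdA w) ++ [P.getLastD [] ++ [w]] := by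
  unfold pvStepA
  have hlen : ¬ P.length = 0 := by simpa [List.length_eq_zero_iff] using hP
  simp only [hlen, if_neg, if_false]
  rw [List.dropLast_concat, List.getLastD_concat]

def pvLeM (a b : List Int) : Prop := (↑a : Multiset Int) ≤ (↑b : Multiset Int)

theorem pairwise_le_getLast (P : List (List Int)) (h : P.Pairwise pvLeM)
    (p : List Int) (hp : p ∈ P) : (↑p : Multiset Int) ≤ ↑(P.getLastD []) := by
  induction P with
  | nil => cases hp
  | cons x t ih =>
    rcases List.pairwise_cons.1 h with ⟨hall, ht⟩
    cases t with
    | nil =>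
      simp only [List.mem_singleton] at hp
      subst hp
      exact le_refl _
    | cons y t' =>
      rcases List.mem_cons.1 hp with rfl | hpt
      · have hD : ((p :: y :: t').getLastD []) = ((y :: t').getLastD []) := rfl
        rw [hD]
        have hmem : ((y :: t').getLastD []) ∈ y :: t' := by
          rw [List.getLastD_eq_getLast?, List.getLast?_eq_some_getLast (by simp)]
          exact List.getLast_mem _
        exact hall _ hmem
      · have hD : ((x :: y :: t').getLastD []) = ((y :: t').getLastD []) := rfl
        rw [hD]
        exact ih ht hpt

def pvInv (tops : List Int) (patterns : List (List Int)) : Prop :=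
  ∃ rest, patterns = tops :: rest ∧ List.Pairwise (· < ·) tops ∧ patterns.Pairwise pvLeM

theorem pvInv_step (tops : List Int) (patterns : List (List Int)) (w : Int)
    (h : pvInv tops patterns) : pvInv (pvStepB tops w) (pvStepA patterns w) := by
  obtain ⟨rest, rfl, hsT, hpw⟩ := h
  rw [pvStepA_eq _ (List.cons_ne_nil _ _) w]
  refine ⟨rest.map (pvUpdA w) ++ [(tops :: rest).getLastD [] ++ [w]], ?_,
    pvStepB_sorted w tops hsT, ?_⟩
  · rw [List.map_cons, List.cons_append, pvUpdA_sorted w tops hsT]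
  · apply List.pairwise_append.2
    refine ⟨hpw.map _ (fun {a b} hab => pvUpdA_mono w a b hab), List.pairwise_singleton _ _, ?_⟩
    intro a ha L hL
    simp only [List.mem_singleton] at hL
    subst hL
    obtain ⟨p, hp, rfl⟩ := List.mem_map.1 ha
    show (↑(pvUpdA w p) : Multiset Int) ≤ ↑((tops :: rest).getLastD [] ++ [w])
    calc (↑(pvUpdA w p) : Multiset Int) ≤ ↑p + {w} := pvUpdA_le_add w p
      _ ≤ ↑((tops :: rest).getLastD []) + {w} := by
          gcongr
          exact pairwise_le_getLast _ hpw p hp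
      _ = ↑((tops :: rest).getLastD [] ++ [w]) := by
          simp [← Multiset.coe_singleton]

theorem pvInv_foldl (ws : List Int) (tops : List Int) (patterns : List (List Int))
    (h : pvInv tops patterns) :
    pvInv (ws.foldl pvStepB tops) (ws.foldl pvStepA patterns) := by
  induction ws generalizing tops patterns with
  | nil => exact h
  | cons w ws ih => exact ih _ _ (pvInv_step tops patterns w h)

theorem foldl_min_all_ge (t : List Int) : ∀ x : Int, (∀ y ∈ t, x ≤ y) → t.foldl min x = x := by
  induction t with
  | nil => intro x _; rfl
  | cons y t ih =>
    intro x hx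
    rw [List.foldl_cons, min_eq_left (hx y (by simp))]
    exact ih x (fun z hz => hx z (by simp [hz]))

theorem search_eq_alt (weights : List Int) (h : weights ≠ []) :
    search weights = search_alt weights := by
  obtain ⟨w, ws, rfl⟩ := List.exists_cons_of_ne_nil h
  unfold search search_alt
  have h0a : pvStepA [] w = [[w]] := rfl
  have h0b : pvStepB [] w = [w] := rfl
  rw [List.foldl_cons, List.foldl_cons, h0a, h0b]
  obtain ⟨rest, hP, hsT, hpw⟩ :=
    pvInv_foldl ws [w] [[w]] ⟨[], rfl, List.pairwise_singleton _ _, List.pairwise_singleton _ _⟩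
  rw [hP]
  have hall : ∀ y ∈ rest.map (fun p => (p.length : Int)),
      (((ws.foldl pvStepB [w]).length : Int)) ≤ y := by
    intro y hy
    obtain ⟨p, hp, rfl⟩ := List.mem_map.1 hy
    have hle : (↑(ws.foldl pvStepB [w]) : Multiset Int) ≤ ↑p := by
      have := (List.pairwise_cons.1 (hP ▸ hpw)).1 p hp
      exact this
    have := Multiset.card_le_card hle
    simpa using this
  show (match PySem.List.min? (((ws.foldl pvStepB [w]) :: rest).map (fun piles => (piles.length : Int))) (fun x => x) with
        | some m => m | none => 0) = ((ws.foldl pvStepB [w]).length : Int)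
  rw [List.map_cons, PySem.List.min?_id_cons, foldl_min_all_ge _ _ hall]

-- ===== VERDICT (by name: the statement is the Claim_ definition above) =====
theorem search_spec : Claim_equal_search := by
  intro weights _ hpre
  unfold Spec_search
  exact search_eq_alt weights hpre
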